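-- pv_equiv track=rewrite | github.com/andrew2719/Module_banks | 3-1/AI/subsequence.py | dfs
-- ===== SOURCE A (Python) =====
-- def transform_sequence(seq):
--     transformations = {
--         "AC": "E",
--         "AB": "BC",
--         "BB": "E"
--     }
--     results = []
--
--     for k, v in transformations.items():
--         index = seq.find(k)
--         while index != -1:
--             transformed = seq[:index] + v + seq[index+len(k):]
--             results.append(transformed)
--             index = seq.find(k, index + 1)
--
--     # For Ex = x transformation
--     for i in range(len(seq) - 1):
--         if seq[i] == 'E':
--             transformed = seq[:i] + seq[i+1] + seq[i+2:]
--             results.append(transformed)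
--
--     return results
--
-- def dfs(seq, path, visited):
--     if seq == "E":
--         return path + [seq]
--
--     if seq in visited:
--         return None
--
--     visited.add(seq)
--     for next_seq in transform_sequence(seq):
--         result = dfs(next_seq, path + [seq], visited)
--         if result:
--             return result
--     return None
-- ===== SOURCE B (Python) =====
-- def transform_sequence(seq):
--     transformations = {
--         "AC": "E",
--         "AB": "BC",
--         "BB": "E"
--     }
--     results = []
--
--     for k, v in transformations.items():
--         index = seq.find(k)
--         while index != -1:
--             transformed = seq[:index] + v + seq[index+len(k):]
--             results.append(transformed)
--             index = seq.find(k, index + 1)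
--
--     # For Ex = x transformation
--     for i in range(len(seq) - 1):
--         if seq[i] == 'E':
--             transformed = seq[:i] + seq[i+1] + seq[i+2:]
--             results.append(transformed)
--
--     return results
--
-- def dfs(seq, path, visited):
--     # Iterative explicit-stack DFS instead of recursion (return value and
--     # visited-set mutation identical to the recursive version).
--     stack = [(seq, path)]
--     while stack:
--         cur, p = stack.pop()
--         if cur == "E":
--             return p + [cur]
--         if cur in visited:
--             continue
--         visited.add(cur)
--         for child in reversed(transform_sequence(cur)):
--             stack.append((child, p + [cur]))
--     return None
-- ===== Notes on version B (the rewrite author's own statement) =====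
-- stated objective: alternative
-- what changed: A's recursive DFS is replaced by an iterative DFS over an explicit stack (children pushed in reverse so they pop in order, visited marked on pop), giving the identical traversal, return value and visited-set mutation without recursion.
import Mathlib
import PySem

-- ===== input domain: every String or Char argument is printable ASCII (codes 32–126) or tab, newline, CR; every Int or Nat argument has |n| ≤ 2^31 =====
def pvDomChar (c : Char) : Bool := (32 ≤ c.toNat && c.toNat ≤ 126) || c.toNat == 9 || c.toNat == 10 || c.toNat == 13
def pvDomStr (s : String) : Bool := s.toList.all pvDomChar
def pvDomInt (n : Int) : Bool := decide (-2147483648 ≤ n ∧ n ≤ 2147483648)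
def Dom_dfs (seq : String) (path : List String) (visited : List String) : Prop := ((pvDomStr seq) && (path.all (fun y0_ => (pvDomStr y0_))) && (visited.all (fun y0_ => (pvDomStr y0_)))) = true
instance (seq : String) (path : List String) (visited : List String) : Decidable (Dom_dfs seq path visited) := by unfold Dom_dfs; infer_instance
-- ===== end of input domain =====

-- B replaces A's recursive DFS by an iterative explicit-stack DFS (same traversal order,
-- same return value, and the same in-place additions to the caller's visited set).
-- Both Pythons mutate `visited` in place identically; the equivalence proved here is about the return value.
-- Both ports carry a fuel counter, decremented once per newly visited state, started at a bound
-- ((n+4)^(n+1)+2, n = len(seq)) that exceeds the number of strings of length ≤ n over the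
-- reachable alphabet, i.e. the number of states the search can ever visit — a totality guard only.

-- ===== PORT A =====

-- termination fact for the `while index != -1` find-loop of transform_sequence
theorem pvFindFrom_bounds (s k : List Char) (start : Nat)
    (h : PySem.Chars.findFrom s k (start : Int) none ≠ -1) :
    start ≤ s.length ∧ start ≤ (PySem.Chars.findFrom s k (start : Int) none).toNat := by
  by_cases hs : start ≤ s.length
  · refine ⟨hs, ?_⟩
    have := (PySem.Chars.findFrom_natCast_spec s k start hs h).1
    omega
  · exfalso
    apply h
    simp only [PySem.Chars.findFrom]
    have h1 : ¬ ((start : Int) < 0) := by omega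
    have h2 : (s.length : Int) < (start : Int) := by exact_mod_cast Nat.lt_of_not_le hs
    simp [h1, h2]

-- the `index = seq.find(k); while index != -1: …; index = seq.find(k, index+1)` loop of A,
-- parametrised by the position the next find starts from (0 for the first plain find)
def occLoop (s k v : List Char) (start : Nat) : List (List Char) :=
  let index := PySem.Chars.findFrom s k (start : Int) none
  if h : index = -1 then []
  else
    (PySem.Chars.slice s none (some index) ++ v ++
       PySem.Chars.slice s (some (index + (k.length : Int))) none)
      :: occLoop s k v (index.toNat + 1)
termination_by s.length + 1 - start
decreasing_by
  have := pvFindFrom_bounds s k start h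
  omega

def transformSequence (seq : String) : List String :=
  let s := seq.toList
  let fromPairs :=
    [("AC", "E"), ("AB", "BC"), ("BB", "E")].foldl
      (fun acc kv => acc ++ occLoop s kv.1.toList kv.2.toList 0) []
  -- For Ex = x transformation
  let exLoop :=
    (PySem.List.pyRange 0 (PySem.List.len s - 1) 1).foldl
      (fun acc i =>
        if PySem.List.pyGetD s i ' ' = 'E' then
          acc ++ [PySem.Chars.slice s none (some i) ++
                    PySem.List.pyGetD s (i + 1) ' ' ::
                      PySem.Chars.slice s (some (i + 2)) none]
        else acc) []
  (fromPairs ++ exLoop).map (fun cs => String.ofList cs)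

-- Python truthiness of `result` (None or a list)
def resTruthy (o : Option (List String)) : Bool :=
  match o with
  | none => false
  | some l => !l.isEmpty

-- fuel bound: exceeds the number of strings of length ≤ len(seq) over the reachable alphabet
def fuelBound (seq : String) : Nat :=
  (seq.toList.length + 4) ^ (seq.toList.length + 1) + 2

mutual
-- A's dfs, returning (result, remaining fuel, visited)
def dfsA (fuel : Nat) (seq : String) (path : List String) (visited : PySem.Set String) :
    Option (List String) × Nat × PySem.Set String :=
  if seq = "E" then (some (path ++ [seq]), fuel, visited)
  else if PySem.Set.contains visited seq then (none, fuel, visited)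
  else
    match fuel with
    | 0 => (none, 0, visited)  -- fuel guard, never reached from fuelBound
    | f + 1 => goA f (transformSequence seq) (path ++ [seq]) (PySem.Set.add visited seq)
termination_by (fuel, 0, 0)
decreasing_by exact Prod.Lex.left _ _ (by omega)

-- A's `for next_seq in transform_sequence(seq): …` loop
def goA (fuel : Nat) (children : List String) (p : List String) (visited : PySem.Set String) :
    Option (List String) × Nat × PySem.Set String :=
  match children with
  | [] => (none, fuel, visited)
  | c :: cs =>
    let t := dfsA fuel c p visited
    if resTruthy t.1 then t
    else goA (min t.2.1 fuel) cs p t.2.2  -- min is a no-op (fuel never grows); it carries the termination measure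
termination_by (fuel, 1, children.length)
decreasing_by
  · exact Prod.Lex.right _ (Prod.Lex.left _ _ (by omega))
  · rcases lt_or_eq_of_le (Nat.min_le_right t.2.1 fuel) with hlt | heq
    · exact Prod.Lex.left _ _ hlt
    · rw [heq]; exact Prod.Lex.right _ (Prod.Lex.right _ (by simp))
end

def dfs (seq : String) (path : List String) (visited : List String) : Option (List String) :=
  (dfsA (fuelBound seq) seq path (PySem.Set.ofList visited)).1

-- ===== PORT B =====

-- B's while-loop over the explicit stack (top of the stack = head of the list)
def loopB (fuel : Nat) (stack : List (String × List String)) (visited : PySem.Set String) :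
    Option (List String) :=
  match stack with
  | [] => none
  | (cur, p) :: rest =>
    if cur = "E" then some (p ++ [cur])
    else if PySem.Set.contains visited cur then loopB fuel rest visited
    else
      match fuel with
      | 0 => loopB 0 rest visited  -- fuel guard, never reached from fuelBound
      | f + 1 =>
        loopB f (((transformSequence cur).map (fun c => (c, p ++ [cur]))) ++ rest)
          (PySem.Set.add visited cur)
termination_by (fuel, stack.length)
decreasing_by
  · exact Prod.Lex.right _ (by simp)
  · exact Prod.Lex.right _ (by simp)
  · exact Prod.Lex.left _ _ (by omega)

def dfs_alt (seq : String) (path : List String) (visited : List String) : Option (List String) :=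
  loopB (fuelBound seq) [(seq, path)] (PySem.Set.ofList visited)

-- ===== PRECONDITION & SPEC =====
def Spec_dfs (seq : String) (path : List String) (visited : List String) (out : Option (List String)) : Prop := out = dfs_alt seq path visited
instance (seq : String) (path : List String) (visited : List String) (out : Option (List String)) : Decidable (Spec_dfs seq path visited out) := by unfold Spec_dfs; infer_instance

-- ===== CLAIM (what is proved, stated in full; the proofs are below) =====
def Claim_equal_dfs : Prop := ∀ (seq : String) (path : List String) (visited : List String), Dom_dfs seq path visited → Spec_dfs seq path visited (dfs seq path visited)

-- ===== LEMMAS AND PROOFS =====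

-- proof-layer: fold dfsA over a stack of pending (seq, path) entries
def runA (fuel : Nat) (stack : List (String × List String)) (visited : PySem.Set String) :
    Option (List String) × Nat × PySem.Set String :=
  match stack with
  | [] => (none, fuel, visited)
  | (s, p) :: rest =>
    let t := dfsA fuel s p visited
    if resTruthy t.1 then t
    else runA (min t.2.1 fuel) rest t.2.2

theorem dfsA_goA_fuel_le (fuel : Nat) :
    (∀ s p v, (dfsA fuel s p v).2.1 ≤ fuel) ∧ (∀ cs p v, (goA fuel cs p v).2.1 ≤ fuel) := by
  induction fuel using Nat.strong_induction_on with
  | _ fuel ih =>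
    have hd : ∀ s p v, (dfsA fuel s p v).2.1 ≤ fuel := by
      intro s p v
      rw [dfsA.eq_def]
      split_ifs
      · simp
      · simp
      · cases fuel with
        | zero => simp
        | succ f => exact le_trans ((ih f (by omega)).2 _ _ _) (by omega)
    refine ⟨hd, ?_⟩
    intro cs
    induction cs with
    | nil => intro p v; rw [goA.eq_def]
    | cons c cs ihc =>
      intro p v
      rw [goA.eq_def]
      by_cases h : resTruthy (dfsA fuel c p v).1
      · simp only [h, if_pos]; exact hd c p v
      · simp only [h, if_neg, Bool.false_eq_true, not_false_iff]
        rcases lt_or_eq_of_le (Nat.min_le_right (dfsA fuel c p v).2.1 fuel) with hlt | heq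
        · exact le_trans ((ih _ hlt).2 cs p _) (le_of_lt hlt)
        · rw [heq]; exact ihc p _

theorem dfsA_some_ne_nil (fuel : Nat) :
    (∀ s p v l, (dfsA fuel s p v).1 = some l → l ≠ []) ∧
      (∀ cs p v l, (goA fuel cs p v).1 = some l → l ≠ []) := by
  induction fuel using Nat.strong_induction_on with
  | _ fuel ih =>
    have hd : ∀ s p v l, (dfsA fuel s p v).1 = some l → l ≠ [] := by
      intro s p v l h
      rw [dfsA.eq_def] at h
      split_ifs at h
      · replace h : some (p ++ [s]) = some l := h
        obtain rfl := (Option.some.inj h).symm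
        simp
      · cases fuel with
        | zero => exact absurd (show (none : Option (List String)) = some l from h) (by simp)
        | succ f => exact (ih f (by omega)).2 _ _ _ _ h
    refine ⟨hd, ?_⟩
    intro cs
    induction cs with
    | nil => intro p v l h; rw [goA.eq_def] at h; simp at h
    | cons c cs ihc =>
      intro p v l h
      rw [goA.eq_def] at h
      by_cases ht : resTruthy (dfsA fuel c p v).1
      · simp only [ht, if_pos] at h
        exact hd c p v l h
      · simp only [ht, if_neg, Bool.false_eq_true, not_false_iff] at h
        rcases lt_or_eq_of_le (Nat.min_le_right (dfsA fuel c p v).2.1 fuel) with hlt | heq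
        · exact (ih _ hlt).2 cs p _ _ h
        · rw [heq] at h; exact ihc p _ _ h

theorem resTruthy_false_eq_none (fuel : Nat) (s : String) (p : List String) (v : PySem.Set String)
    (h : resTruthy (dfsA fuel s p v).1 = false) : (dfsA fuel s p v).1 = none := by
  cases ho : (dfsA fuel s p v).1 with
  | none => rfl
  | some l =>
    exfalso
    have hne := (dfsA_some_ne_nil fuel).1 s p v l ho
    rw [ho] at h
    simp [resTruthy, List.isEmpty_iff] at h
    exact hne h

theorem runA_fuel_le (stack : List (String × List String)) :
    ∀ fuel v, (runA fuel stack v).2.1 ≤ fuel := by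
  induction stack with
  | nil => intro fuel v; rw [runA]
  | cons e rest ih =>
    intro fuel v
    obtain ⟨s, p⟩ := e
    rw [runA]
    by_cases h : resTruthy (dfsA fuel s p v).1
    · simp only [h, if_pos]; exact (dfsA_goA_fuel_le fuel).1 s p v
    · simp only [h, if_neg, Bool.false_eq_true, not_false_iff]
      exact le_trans (ih _ _) (Nat.min_le_right _ _)

theorem runA_append (xs : List (String × List String)) :
    ∀ fuel v ys,
      runA fuel (xs ++ ys) v =
        (let u := runA fuel xs v;
         if resTruthy u.1 then u else runA (min u.2.1 fuel) ys u.2.2) := by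
  induction xs with
  | nil =>
    intro fuel v ys
    simp [runA, resTruthy]
  | cons e xs ih =>
    intro fuel v ys
    obtain ⟨s, p⟩ := e
    simp only [List.cons_append, runA]
    by_cases h : resTruthy (dfsA fuel s p v).1
    · simp [h]
    · simp only [h, if_neg, Bool.false_eq_true, not_false_iff]
      rw [ih]
      simp only []
      by_cases h2 : resTruthy (runA (min (dfsA fuel s p v).2.1 fuel) xs (dfsA fuel s p v).2.2).1
      · simp [h2]
      · simp only [h2, if_neg, Bool.false_eq_true, not_false_iff]
        have hle : (runA (min (dfsA fuel s p v).2.1 fuel) xs (dfsA fuel s p v).2.2).2.1 ≤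
            min (dfsA fuel s p v).2.1 fuel := runA_fuel_le _ _ _
        have : min (runA (min (dfsA fuel s p v).2.1 fuel) xs (dfsA fuel s p v).2.2).2.1
            (min (dfsA fuel s p v).2.1 fuel) =
            min (runA (min (dfsA fuel s p v).2.1 fuel) xs (dfsA fuel s p v).2.2).2.1 fuel := by
          have := Nat.min_le_right (dfsA fuel s p v).2.1 fuel
          omega
        rw [this]

theorem runA_map (cs : List String) :
    ∀ fuel q v, runA fuel (cs.map (fun c => (c, q))) v = goA fuel cs q v := by
  induction cs with
  | nil => intro fuel q v; rw [goA.eq_def]; rw [List.map_nil, runA]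
  | cons c cs ih =>
    intro fuel q v
    rw [List.map_cons, runA, goA]
    by_cases h : resTruthy (dfsA fuel c q v).1
    · simp [h]
    · simp only [h, if_neg, Bool.false_eq_true, not_false_iff]
      exact ih _ _ _

theorem loopB_eq_runA (fuel : Nat) :
    ∀ stack v, loopB fuel stack v = (runA fuel stack v).1 := by
  induction fuel using Nat.strong_induction_on with
  | _ fuel ihf =>
    intro stack
    induction stack with
    | nil => intro v; rw [loopB.eq_def, runA]
    | cons e rest ihs =>
      intro v
      obtain ⟨cur, p⟩ := e
      rw [loopB.eq_def, runA]
      by_cases hE : cur = "E"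
      · rw [dfsA.eq_def]
        simp [hE, resTruthy]
      · simp only [hE, if_neg, not_false_iff]
        by_cases hv : PySem.Set.contains v cur
        · rw [dfsA.eq_def]
          simp only [hE, if_neg, not_false_iff, hv, if_pos, resTruthy, Bool.false_eq_true]
          rw [ihs v]
          simp
        · simp only [hv, if_neg, Bool.false_eq_true, not_false_iff]
          match fuel with
          | 0 =>
            rw [dfsA.eq_def]
            simp only [hE, hv, if_neg, Bool.false_eq_true, not_false_iff, resTruthy]
            rw [ihs v]
            simp
          | f + 1 =>
            rw [dfsA.eq_def]
            simp only [hE, hv, if_neg, Bool.false_eq_true, not_false_iff]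
            rw [ihf f (by omega) _ (PySem.Set.add v cur), runA_append]
            rw [runA_map]
            simp only []
            by_cases ht : resTruthy (goA f (transformSequence cur) (p ++ [cur]) (PySem.Set.add v cur)).1
            · simp [ht]
            · simp only [ht, if_neg, Bool.false_eq_true, not_false_iff]
              have hle : (goA f (transformSequence cur) (p ++ [cur]) (PySem.Set.add v cur)).2.1 ≤ f :=
                (dfsA_goA_fuel_le f).2 _ _ _
              have hmin : min (goA f (transformSequence cur) (p ++ [cur]) (PySem.Set.add v cur)).2.1 (f + 1) =
                  min (goA f (transformSequence cur) (p ++ [cur]) (PySem.Set.add v cur)).2.1 f := by omega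
              rw [hmin]

-- ===== VERDICT (by name: the statement is the Claim_ definition above) =====
theorem dfs_spec : Claim_equal_dfs := by
  intro seq path visited _
  unfold Spec_dfs dfs dfs_alt
  rw [loopB_eq_runA, runA]
  by_cases h : resTruthy (dfsA (fuelBound seq) seq path (PySem.Set.ofList visited)).1
  · simp [h]
  · simp only [h, if_neg, Bool.false_eq_true, not_false_iff]
    rw [runA]
    exact resTruthy_false_eq_none _ _ _ _ (by simpa using h)
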